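-- pv_equiv track=rewrite | github.com/chadakinz/pokerbot3 | environment.py | get_call_amount
-- ===== SOURCE A (Python) =====
-- def get_call_amount(history):
--     """
--     Returns the most recent raise amount from the action history,
--     which represents the amount to call. Returns 0 if there was no raise.
--
--     Assumes history is a tuple of actions, where each action is a dict like:
--     {player_id: {'R': amount}} or {player_id: {'C': amount}}, etc.
--     """
--     for item in reversed(history):
--         if isinstance(item, dict):
--             for action_dict in item.values():
--                 if isinstance(action_dict, dict):
--                     if 'R' in action_dict:
--                         return action_dict['R']
--     return 0
-- ===== SOURCE B (Python) =====
-- def get_call_amount(history):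
--     """Forward full-scan with an accumulator: the last item containing a
--     raise overwrites the accumulator; returns 0 if no raise occurred."""
--     amount = 0
--     for item in history:
--         for action_dict in item.values():
--             if 'R' in action_dict:
--                 amount = action_dict['R']
--                 break
--     return amount
-- ===== Notes on version B (the rewrite author's own statement) =====
-- stated objective: alternative
-- what changed: Replaced the reverse early-exit scan with a single forward pass maintaining an accumulator that the last raise-containing item overwrites.
import Mathlib
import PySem

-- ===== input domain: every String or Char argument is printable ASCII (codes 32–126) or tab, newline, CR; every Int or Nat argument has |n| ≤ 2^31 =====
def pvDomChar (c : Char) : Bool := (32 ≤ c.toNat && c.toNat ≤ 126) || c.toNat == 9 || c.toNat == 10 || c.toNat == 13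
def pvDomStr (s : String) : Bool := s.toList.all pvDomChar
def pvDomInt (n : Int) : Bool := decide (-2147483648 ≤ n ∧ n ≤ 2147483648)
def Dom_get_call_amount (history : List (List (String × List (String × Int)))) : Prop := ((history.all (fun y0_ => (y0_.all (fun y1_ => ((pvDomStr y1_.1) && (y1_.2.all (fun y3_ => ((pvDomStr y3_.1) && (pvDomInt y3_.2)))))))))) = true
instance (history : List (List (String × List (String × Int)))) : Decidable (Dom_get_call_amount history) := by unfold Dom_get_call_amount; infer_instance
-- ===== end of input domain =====

-- B replaces A's reverse early-exit scan by a forward accumulator pass; objective: alternative decomposition (same cost).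

-- ===== PORT A =====
-- A's inner loop: for each value dict of the item, if 'R' in it, return its 'R' value.
def pvA_itemRaise (item : List (String × List (String × Int))) : Option Int :=
  match item with
  | [] => none
  | (_, d) :: rest =>
    match PySem.Dict.get? (PySem.Dict.mk d) "R" with
    | some v => some v
    | none => pvA_itemRaise rest

-- A's outer loop over reversed(history), early return.
def pvA_revScan (items : List (List (String × List (String × Int)))) : Int :=
  match items with
  | [] => 0
  | item :: rest =>
    match pvA_itemRaise item with
    | some v => v
    | none => pvA_revScan rest

def get_call_amount (history : List (List (String × List (String × Int)))) : Int :=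
  pvA_revScan history.reverse

-- ===== PORT B =====
-- B's inner loop: first value dict containing 'R' (break after updating the accumulator).
def pvB_firstR (item : List (String × List (String × Int))) : Option Int :=
  match item with
  | [] => none
  | (_, d) :: rest =>
    match PySem.Dict.get? (PySem.Dict.mk d) "R" with
    | some v => some v
    | none => pvB_firstR rest

def get_call_amount_alt (history : List (List (String × List (String × Int)))) : Int :=
  history.foldl (fun amount item =>
    match pvB_firstR item with
    | some v => v
    | none => amount) 0

-- ===== PRECONDITION & SPEC =====
def Spec_get_call_amount (history : List (List (String × List (String × Int)))) (out : Int) : Prop := out = get_call_amount_alt history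
instance (history : List (List (String × List (String × Int)))) (out : Int) : Decidable (Spec_get_call_amount history out) := by unfold Spec_get_call_amount; infer_instance

-- ===== CLAIM (what is proved, stated in full; the proofs are below) =====
def Claim_equal_get_call_amount : Prop := ∀ (history : List (List (String × List (String × Int)))), Dom_get_call_amount history → Spec_get_call_amount history (get_call_amount history)

-- ===== LEMMAS AND PROOFS =====
theorem pv_itemRaise_eq_firstR (item : List (String × List (String × Int))) :
    pvA_itemRaise item = pvB_firstR item := by
  induction item with
  | nil => rfl
  | cons hd tl ih => simp [pvA_itemRaise, pvB_firstR, ih]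

theorem pv_revScan_eq_foldl (l : List (List (String × List (String × Int)))) :
    pvA_revScan l.reverse =
      l.foldl (fun amount item =>
        match pvB_firstR item with
        | some v => v
        | none => amount) 0 := by
  induction l using List.reverseRecOn with
  | nil => rfl
  | append_singleton l x ih =>
    simp only [List.reverse_append, List.reverse_cons, List.reverse_nil, List.nil_append,
      List.cons_append, List.foldl_append, List.foldl_cons, List.foldl_nil]
    rw [pvA_revScan, pv_itemRaise_eq_firstR, ← ih]

-- ===== VERDICT (by name: the statement is the Claim_ definition above) =====
theorem get_call_amount_spec : Claim_equal_get_call_amount := by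
  intro history _
  unfold Spec_get_call_amount get_call_amount get_call_amount_alt
  exact pv_revScan_eq_foldl history
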